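-- pv_equiv track=rewrite | github.com/nugroho-s/LeetcodeSolutions | Greatest Common Divisor of Strings/solution.py | checkDivisor
-- ===== SOURCE A (Python) =====
-- def checkDivisor(str1: str, divisor: str) -> bool:
--     len_div = len(divisor)
--     if len(str1) % len_div is not 0:
--         return False
--     i = 0
--     while i < len(str1):
--         if str1[i:i+len_div] != divisor:
--             return False
--         i += len_div
--     return True
-- ===== SOURCE B (Python) =====
-- def checkDivisor(str1: str, divisor: str) -> bool:
--     q = len(str1) // len(divisor)
--     return str1 == divisor * q
-- ===== Notes on version B (the rewrite author's own statement) =====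
-- stated objective: idiomatic
-- what changed: Replaces A's index loop comparing each len(divisor)-sized slice against divisor with a single materialize-and-compare: build divisor repeated len(str1)//len(divisor) times and compare to str1 (a length mismatch then yields False exactly where A's modulo check does); empty divisor still raises ZeroDivisionError in both.
import Mathlib
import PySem

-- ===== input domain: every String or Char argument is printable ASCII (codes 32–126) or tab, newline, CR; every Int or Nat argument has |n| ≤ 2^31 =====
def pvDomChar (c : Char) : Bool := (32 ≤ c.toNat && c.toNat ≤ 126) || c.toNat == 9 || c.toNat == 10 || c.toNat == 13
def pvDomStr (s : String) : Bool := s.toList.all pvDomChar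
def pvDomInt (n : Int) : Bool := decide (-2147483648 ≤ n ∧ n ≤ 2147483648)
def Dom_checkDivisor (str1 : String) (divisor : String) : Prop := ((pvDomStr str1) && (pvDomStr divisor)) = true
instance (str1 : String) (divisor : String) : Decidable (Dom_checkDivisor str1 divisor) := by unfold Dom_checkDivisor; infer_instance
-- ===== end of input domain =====

-- B replaces A's block-by-block slicing scan with one idiomatic materialize-and-compare
-- (str1 == divisor * (len(str1)//len(divisor))); same cost, no loop.


-- ===== PORT A =====
-- A's while-loop: fuel = str1.length + 1 suffices since i advances by d.length ≥ 1
-- on every admitted input (Pre_ excludes the empty divisor, where Python raises).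
def checkDivisorLoop (s d : List Char) (fuel i : Nat) : Bool :=
  match fuel with
  | 0 => true
  | f + 1 =>
    if i < s.length then
      if PySem.List.slice s (some (i : Int)) (some ((i : Int) + (d.length : Int))) ≠ d then
        false
      else
        checkDivisorLoop s d f (i + d.length)
    else true

def checkDivisor (str1 : String) (divisor : String) : Bool :=
  let lenDiv := divisor.toList.length
  if str1.toList.length % lenDiv ≠ 0 then false
  else checkDivisorLoop str1.toList divisor.toList (str1.toList.length + 1) 0

-- ===== PORT B =====
-- Source B: q = len(str1) // len(divisor); return str1 == divisor * q
def checkDivisor_alt (str1 : String) (divisor : String) : Bool :=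
  let q := str1.toList.length / divisor.toList.length
  decide (str1.toList = (List.replicate q divisor.toList).flatten)

-- ===== PRECONDITION & SPEC =====
-- Pre_ excludes only the empty divisor, on which both Pythons raise ZeroDivisionError.
def Pre_checkDivisor (str1 : String) (divisor : String) : Prop := divisor ≠ ""
instance (str1 : String) (divisor : String) : Decidable (Pre_checkDivisor str1 divisor) := by
  unfold Pre_checkDivisor; infer_instance

def pvWitness_checkDivisor : String × String := ("abab", "ab")

def Spec_checkDivisor (str1 : String) (divisor : String) (out : Bool) : Prop := out = checkDivisor_alt str1 divisor
instance (str1 : String) (divisor : String) (out : Bool) : Decidable (Spec_checkDivisor str1 divisor out) := by unfold Spec_checkDivisor; infer_instance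

-- ===== CLAIM (what is proved, stated in full; the proofs are below) =====
def Claim_equal_checkDivisor : Prop := ∀ (str1 : String) (divisor : String), Dom_checkDivisor str1 divisor → Pre_checkDivisor str1 divisor → Spec_checkDivisor str1 divisor (checkDivisor str1 divisor)

-- ===== LEMMAS AND PROOFS =====

-- A's loop, started at i with enough fuel, answers exactly “the suffix from i is
-- (remaining length / d.length) copies of d”.
theorem checkDivisorLoop_eq (s d : List Char) (hd : 1 ≤ d.length) :
    ∀ (fuel i : Nat), s.length - i < fuel →
      checkDivisorLoop s d fuel i
        = decide (s.drop i = (List.replicate ((s.length - i) / d.length) d).flatten) := by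
  intro fuel
  induction fuel with
  | zero => intro i h; omega
  | succ f ih =>
    intro i h
    by_cases hi : i < s.length
    · have hslice : PySem.List.slice s (some (i : Int)) (some ((i : Int) + (d.length : Int)))
          = (s.drop i).take d.length := PySem.List.slice_natCast_add s i d.length
      by_cases hb : (s.drop i).take d.length = d
      · -- block matches: recurse
        have hm : d.length ≤ s.length - i := by
          have : ((s.drop i).take d.length).length = d.length := by rw [hb]
          simp [List.length_take, List.length_drop] at this
          omega
        have hstep : checkDivisorLoop s d (f + 1) i = checkDivisorLoop s d f (i + d.length) := by
          simp [checkDivisorLoop, hi, hslice, hb]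
        have hih := ih (i + d.length) (by omega)
        rw [hstep, hih]
        have hdecomp : s.drop i = d ++ s.drop (i + d.length) := by
          conv_lhs => rw [← List.take_append_drop d.length (s.drop i)]
          rw [hb, List.drop_drop]
        have hq : (s.length - i) / d.length = (s.length - (i + d.length)) / d.length + 1 := by
          have h1 : s.length - i = (s.length - (i + d.length)) + d.length := by omega
          rw [h1, Nat.add_div_right _ (by omega)]
        rw [hq, hdecomp]
        simp [List.replicate_succ]
      · -- block differs: loop returns false; RHS is false too
        have hstep : checkDivisorLoop s d (f + 1) i = false := by
          simp [checkDivisorLoop, hi, hslice, hb]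
        rw [hstep]
        symm
        rw [decide_eq_false_iff_not]
        intro heq
        by_cases hm : d.length ≤ s.length - i
        · -- remaining ≥ one block, so the flatten starts with d
          have hq : 1 ≤ (s.length - i) / d.length := Nat.one_le_div_iff (by omega) |>.mpr hm
          obtain ⟨k, hk⟩ : ∃ k, (s.length - i) / d.length = k + 1 := ⟨_, (Nat.succ_pred_eq_of_pos hq).symm⟩
          rw [hk] at heq
          apply hb
          rw [heq]
          simp [List.replicate_succ, List.take_append_of_le_length (le_refl d.length)]
        · -- remaining shorter than a block: suffix nonempty but flatten is empty
          have hq : (s.length - i) / d.length = 0 := Nat.div_eq_of_lt (by omega)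
          rw [hq] at heq
          simp at heq
          omega
    · -- loop exit: suffix empty, remaining 0
      have hstep : checkDivisorLoop s d (f + 1) i = true := by
        simp [checkDivisorLoop, hi]
      have h0 : s.length - i = 0 := by omega
      rw [hstep, h0]
      simp [List.drop_eq_nil_of_le (by omega : s.length ≤ i)]

-- ===== VERDICT (by name: the statement is the Claim_ definition above) =====
theorem checkDivisor_spec : Claim_equal_checkDivisor := by
  intro str1 divisor _ hpre
  unfold Spec_checkDivisor checkDivisor checkDivisor_alt
  have hd : 1 ≤ divisor.toList.length := by
    unfold Pre_checkDivisor at hpre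
    have hne : divisor.toList ≠ [] := by
      simpa [String.toList_eq_nil_iff] using hpre
    cases hx : divisor.toList with
    | nil => exact absurd hx hne
    | cons a t => simp
  by_cases hm : str1.toList.length % divisor.toList.length = 0
  · simp only [hm, ne_eq, not_true_eq_false, if_false]
    rw [checkDivisorLoop_eq _ _ hd _ 0 (by omega)]
    simp
  · simp only [hm, ne_eq, not_false_eq_true, if_true]
    symm
    rw [decide_eq_false_iff_not]
    intro heq
    have hlen := congrArg List.length heq
    have hflat : ((List.replicate (str1.toList.length / divisor.toList.length)
        divisor.toList).flatten).length
        = str1.toList.length / divisor.toList.length * divisor.toList.length := by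
      simp [List.length_flatten]
    rw [hflat] at hlen
    exact hm (Nat.dvd_iff_mod_eq_zero.mp
      ⟨str1.toList.length / divisor.toList.length, hlen.trans (Nat.mul_comm _ _)⟩)
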